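-- pv_equiv track=rewrite | github.com/GeorgeRCAdamJohnson/radeon_SML | reasoning_agent.py | _search_knowledge_for_entities
-- ===== SOURCE A (Python) =====
-- from typing import Dict, List, Optional, Tuple
--
-- def _search_knowledge_for_entities(knowledge: Dict, entities: List[str]) -> Dict[str, str]:
--     """Search knowledge base for information about each entity"""
--     entity_info = {}
--
--     if 'articles' in knowledge:
--         for entity in entities:
--             best_match = None
--             best_score = 0
--
--             for article in knowledge['articles']:
--                 if isinstance(article, dict) and 'title' in article:
--                     title_lower = article['title'].lower()
--                     entity_lower = entity.lower()
--
--                     # Check for entity in title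
--                     if entity_lower in title_lower or any(word in title_lower for word in entity_lower.split()):
--                         score = len([w for w in entity_lower.split() if w in title_lower])
--                         if score > best_score:
--                             best_score = score
--                             best_match = article
--
--             if best_match:
--                 entity_info[entity] = best_match['content'][:1000]  # First 1000 chars
--
--     return entity_info
-- ===== SOURCE B (Python) =====
-- def _search_knowledge_for_entities(knowledge, entities):
--     """Search knowledge base for information about each entity.
--
--     Vocabulary-indexed variant: each entity's words are tallied once into a
--     counter; each title is matched once against the (sorted, deduplicated)
--     global vocabulary; per-entity scores are then sums of counter lookups
--     over the matched vocabulary words, so no title is scanned per entity word.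
--     """
--     entity_info = {}
--     if 'articles' not in knowledge:
--         return entity_info
--
--     # one counter of word multiplicities per entity occurrence, plus the global vocabulary
--     counters = []
--     vocab = set()
--     for e in entities:
--         c = {}
--         for w in e.lower().split():
--             c[w] = c.get(w, 0) + 1
--         counters.append((e, c))
--         vocab.update(c)
--     vocab = sorted(vocab)
--
--     best = {e: (0, None) for e in entities}
--     for article in knowledge['articles']:
--         if isinstance(article, dict) and 'title' in article:
--             tl = article['title'].lower()
--             matched = [w for w in vocab if w in tl]
--             for e, c in counters:
--                 s = sum(c.get(w, 0) for w in matched)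
--                 if s > best[e][0]:
--                     best[e] = (s, article)
--
--     for e in entities:
--         s, art = best[e]
--         if s > 0:
--             entity_info[e] = art['content'][:1000]
--     return entity_info
-- ===== Notes on version B (the rewrite author's own statement) =====
-- stated objective: alternative
-- what changed: Replaces the per-entity substring scans with a vocabulary index: each entity's lowered words are tallied once into a counter, each title is substring-matched once against the sorted deduplicated global vocabulary, and per-entity scores become sums of counter lookups over the matched vocabulary words (shared and duplicate words are never re-matched); the redundant 'entity_lower in title_lower or any(...)' guard disappears since score>0 already implies it.
import Mathlib
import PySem

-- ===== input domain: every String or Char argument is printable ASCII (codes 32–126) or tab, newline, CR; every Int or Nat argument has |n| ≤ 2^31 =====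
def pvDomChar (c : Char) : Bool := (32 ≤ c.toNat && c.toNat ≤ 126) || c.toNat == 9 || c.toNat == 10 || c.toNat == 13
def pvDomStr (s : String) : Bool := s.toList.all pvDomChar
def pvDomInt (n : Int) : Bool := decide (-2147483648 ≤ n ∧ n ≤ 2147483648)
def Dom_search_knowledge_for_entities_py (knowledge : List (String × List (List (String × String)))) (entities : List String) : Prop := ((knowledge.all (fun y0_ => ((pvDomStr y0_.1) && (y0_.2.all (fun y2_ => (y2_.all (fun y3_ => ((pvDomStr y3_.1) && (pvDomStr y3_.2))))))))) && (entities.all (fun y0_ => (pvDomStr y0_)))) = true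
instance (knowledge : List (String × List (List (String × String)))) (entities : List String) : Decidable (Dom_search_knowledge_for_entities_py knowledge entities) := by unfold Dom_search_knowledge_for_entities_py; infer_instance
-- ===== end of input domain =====

-- B indexes the entity words: per-entity word counters plus a sorted global vocabulary matched
-- once per title, scores via counter lookups; return values proved equal on Pre_.


-- ===== PORT A =====
def search_knowledge_for_entities_py (knowledge : List (String × List (List (String × String)))) (entities : List String) : List (String × String) :=
  match (PySem.Dict.mk knowledge).get? "articles" with
  | none => []
  | some articles =>
    (entities.foldl (fun (acc : PySem.Dict String String) entity =>
      let best := articles.foldl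
        (fun (st : Option (List (String × String)) × Int) article =>
          match (PySem.Dict.mk article).get? "title" with
          | none => st
          | some title =>
            let tl := PySem.Str.lower title
            let el := PySem.Str.lower entity
            if PySem.Str.isIn el tl || (PySem.Str.split₀ el).any (fun w => PySem.Str.isIn w tl) then
              let score : Int := (((PySem.Str.split₀ el).filter (fun w => PySem.Str.isIn w tl)).length : Int)
              if score > st.2 then (some article, score) else st
            else st)
        (none, 0)
      match best.1 with
      | none => acc
      | some art =>
        match (PySem.Dict.mk art).get? "content" with
        | none => acc  -- Python raises KeyError here; such inputs are excluded by Pre_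
        | some content => acc.insert entity (PySem.Str.slice content none (some 1000))
      ) PySem.Dict.empty).items

-- ===== PORT B =====
def search_knowledge_for_entities_py_alt (knowledge : List (String × List (List (String × String)))) (entities : List String) : List (String × String) :=
  match (PySem.Dict.mk knowledge).get? "articles" with
  | none => []
  | some articles =>
    -- one counter of word multiplicities per entity occurrence, plus the global vocabulary
    let cv := entities.foldl
      (fun (p : List (String × PySem.Dict String Int) × PySem.Set String) e =>
        let c := (PySem.Str.split₀ (PySem.Str.lower e)).foldl
          (fun (d : PySem.Dict String Int) w => d.insert w (d.getD w 0 + 1)) PySem.Dict.empty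
        (p.1 ++ [(e, c)], PySem.Set.update p.2 c.keys))
      ([], PySem.Set.empty)
    let counters := cv.1
    let vocab := PySem.List.sorted cv.2 (fun x => x) false
    let init : PySem.Dict String (Int × Option (List (String × String))) :=
      entities.foldl (fun d e => d.insert e ((0 : Int), (none : Option (List (String × String))))) PySem.Dict.empty
    let best := articles.foldl (fun d article =>
      match (PySem.Dict.mk article).get? "title" with
      | none => d
      | some title =>
        let tl := PySem.Str.lower title
        let matched := vocab.filter (fun w => PySem.Str.isIn w tl)
        counters.foldl (fun d p =>
          let s : Int := (matched.map (fun w => p.2.getD w 0)).sum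
          if s > (d.getD p.1 ((0 : Int), none)).1 then d.insert p.1 (s, some article) else d) d) init
    (entities.foldl (fun (acc : PySem.Dict String String) e =>
      match best.getD e ((0 : Int), none) with
      | (score, art?) =>
        if score > 0 then
          match art? with
          | none => acc  -- unreachable: a positive score always records an article
          | some art =>
            match (PySem.Dict.mk art).get? "content" with
            | none => acc  -- Python raises KeyError here; such inputs are excluded by Pre_
            | some content => acc.insert e (PySem.Str.slice content none (some 1000))
        else acc) PySem.Dict.empty).items

-- ===== PRECONDITION & SPEC =====
-- Python A raises KeyError when a best-matching article has a 'title' but no 'content'; Pre_ excludes,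
-- a little more broadly, every input whose 'articles' list contains an article with a 'title' key but no
-- 'content' key (slightly broader than the exact raise set, which would require running the matching).
def Pre_search_knowledge_for_entities_py (knowledge : List (String × List (List (String × String)))) (entities : List String) : Prop :=
  ∀ articles ∈ ((PySem.Dict.mk knowledge).get? "articles"), ∀ article ∈ articles,
    ((PySem.Dict.mk article).get? "title").isSome → ((PySem.Dict.mk article).get? "content").isSome
instance (knowledge : List (String × List (List (String × String)))) (entities : List String) : Decidable (Pre_search_knowledge_for_entities_py knowledge entities) := by unfold Pre_search_knowledge_for_entities_py; infer_instance

def pvWitness_search_knowledge_for_entities_py : (List (String × List (List (String × String)))) × List String :=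
  ([("articles", [[("title", "all about cats"), ("content", "cats are great")]])], ["cats", "dogs"])

def Spec_search_knowledge_for_entities_py (knowledge : List (String × List (List (String × String)))) (entities : List String) (out : List (String × String)) : Prop := out = search_knowledge_for_entities_py_alt knowledge entities
instance (knowledge : List (String × List (List (String × String)))) (entities : List String) (out : List (String × String)) : Decidable (Spec_search_knowledge_for_entities_py knowledge entities out) := by unfold Spec_search_knowledge_for_entities_py; infer_instance

-- ===== CLAIM (what is proved, stated in full; the proofs are below) =====
def Claim_equal_search_knowledge_for_entities_py : Prop := ∀ (knowledge : List (String × List (List (String × String)))) (entities : List String), Dom_search_knowledge_for_entities_py knowledge entities → Pre_search_knowledge_for_entities_py knowledge entities → Spec_search_knowledge_for_entities_py knowledge entities (search_knowledge_for_entities_py knowledge entities)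

-- ===== LEMMAS AND PROOFS =====

-- Shorthands (proof-side only)
abbrev SKArt : Type := List (String × String)
abbrev SKD : Type := PySem.Dict String (Int × Option SKArt)

def skWords (e : String) : List String := PySem.Str.split₀ (PySem.Str.lower e)

def skScore (e tl : String) : Int := (((skWords e).filter (fun w => PySem.Str.isIn w tl)).length : Int)

def skCnt (e : String) : PySem.Dict String Int :=
  (skWords e).foldl (fun d w => d.insert w (d.getD w 0 + 1)) PySem.Dict.empty

def skVocab (entities : List String) : PySem.Set String :=
  entities.foldl (fun s e => PySem.Set.update s (skCnt e).keys) PySem.Set.empty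

-- the per-article, per-entity best update (shared shape of both loops)
def skF (e tl : String) (a : SKArt) (v : Int × Option SKArt) : Int × Option SKArt :=
  if skScore e tl > v.1 then (skScore e tl, some a) else v

-- B's inner per-entity step
def skBE (tl : String) (a : SKArt) (d : SKD) (e : String) : SKD :=
  if skScore e tl > (d.getD e ((0 : Int), none)).1 then d.insert e (skScore e tl, some a) else d

-- B's per-article step
def skBstep (es : List String) (d : SKD) (a : SKArt) : SKD :=
  match (PySem.Dict.mk a).get? "title" with
  | none => d
  | some title => es.foldl (skBE (PySem.Str.lower title) a) d

-- A's per-article step for a fixed entity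
def skAstep (e : String) (st : Option SKArt × Int) (a : SKArt) : Option SKArt × Int :=
  match (PySem.Dict.mk a).get? "title" with
  | none => st
  | some title =>
    let tl := PySem.Str.lower title
    if PySem.Str.isIn (PySem.Str.lower e) tl || (skWords e).any (fun w => PySem.Str.isIn w tl) then
      if skScore e tl > st.2 then (some a, skScore e tl) else st
    else st

-- A's loop-state invariant: no match yet (score 0) or a recorded match with positive score
def skP (st : Option SKArt × Int) : Prop := (st.1 = none ∧ st.2 = 0) ∨ (∃ a, st.1 = some a ∧ 0 < st.2)

lemma skGuard {e tl : String} (h : 0 < skScore e tl) :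
    ((skWords e).any (fun w => PySem.Str.isIn w tl)) = true := by
  unfold skScore at h
  have hl : 0 < ((skWords e).filter (fun w => PySem.Str.isIn w tl)).length := by exact_mod_cast h
  obtain ⟨w, hw⟩ := List.exists_mem_of_length_pos hl
  rw [List.mem_filter] at hw
  rw [List.any_eq_true]
  exact ⟨w, hw.1, hw.2⟩

lemma skAstep_P {e : String} {st : Option SKArt × Int} (a : SKArt) (h : skP st) :
    skP (skAstep e st a) := by
  unfold skAstep
  cases hT : (PySem.Dict.mk a).get? "title" with
  | none => exact h
  | some title =>
    simp only
    split_ifs with h1 h2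
    · exact Or.inr ⟨a, rfl, by
        rcases h with ⟨_, h0⟩ | ⟨_, _, h0⟩ <;> omega⟩
    · exact h
    · exact h

lemma skP_nonneg {st : Option SKArt × Int} (h : skP st) : 0 ≤ st.2 := by
  rcases h with ⟨_, h0⟩ | ⟨_, _, h0⟩ <;> omega

-- A's step mirrors skF (pair components swapped), given the invariant
lemma skAstep_eq_skF {e : String} {st : Option SKArt × Int} {a : SKArt} {title : String}
    (hT : (PySem.Dict.mk a).get? "title" = some title) (hP : skP st) :
    ((skAstep e st a).2, (skAstep e st a).1) = skF e (PySem.Str.lower title) a (st.2, st.1) := by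
  unfold skAstep skF
  rw [hT]
  simp only
  by_cases hs : skScore e (PySem.Str.lower title) > st.2
  · have hpos : 0 < skScore e (PySem.Str.lower title) := lt_of_le_of_lt (skP_nonneg hP) hs
    rw [if_pos (by rw [skGuard hpos]; simp), if_pos hs, if_pos hs]
  · by_cases hg : (PySem.Str.isIn (PySem.Str.lower e) (PySem.Str.lower title) ||
        (skWords e).any (fun w => PySem.Str.isIn w (PySem.Str.lower title))) = true
    · rw [if_pos hg, if_neg hs, if_neg hs]
    · rw [if_neg hg, if_neg hs]

lemma skF_idem (e tl : String) (a : SKArt) (v : Int × Option SKArt) :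
    skF e tl a (skF e tl a v) = skF e tl a v := by
  unfold skF
  split_ifs with h1 h2 <;> simp_all

lemma skBE_getD (tl : String) (a : SKArt) (d : SKD) (e e' : String) :
    (skBE tl a d e').getD e ((0 : Int), none) =
      if e = e' then skF e tl a (d.getD e ((0 : Int), none)) else d.getD e ((0 : Int), none) := by
  unfold skBE skF
  by_cases he : e = e'
  · subst he
    by_cases h1 : skScore e tl > (d.getD e ((0 : Int), none)).1
    · rw [if_pos h1, if_pos h1, PySem.Dict.getD_insert, if_pos rfl]
    · rw [if_neg h1, if_pos rfl, if_neg h1]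
  · by_cases h1 : skScore e' tl > (d.getD e' ((0 : Int), none)).1
    · rw [if_pos h1, if_neg he, PySem.Dict.getD_insert, if_neg he]
    · rw [if_neg h1, if_neg he]

-- effect of B's per-article entity sweep on one key
lemma skL1 (tl : String) (a : SKArt) (e : String) :
    ∀ (es : List String) (d : SKD),
      (es.foldl (skBE tl a) d).getD e ((0 : Int), none) =
        if e ∈ es then skF e tl a (d.getD e ((0 : Int), none)) else d.getD e ((0 : Int), none) := by
  intro es
  induction es with
  | nil => intro d; simp
  | cons e' rest ih =>
    intro d
    simp only [List.foldl_cons, ih, skBE_getD, List.mem_cons]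
    by_cases he : e = e'
    · subst he
      by_cases hr : e ∈ rest <;> simp [hr, skF_idem]
    · by_cases hr : e ∈ rest <;> simp [he, hr]

-- loop interchange: B's dict entry for e tracks A's inner fold for e
lemma skL2 (es : List String) (e : String) (he : e ∈ es) :
    ∀ (arts : List SKArt) (st : Option SKArt × Int) (d : SKD), skP st →
      d.getD e ((0 : Int), none) = (st.2, st.1) →
      (arts.foldl (skBstep es) d).getD e ((0 : Int), none) =
        ((arts.foldl (skAstep e) st).2, (arts.foldl (skAstep e) st).1) := by
  intro arts
  induction arts with
  | nil => intro st d _ hd; simpa using hd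
  | cons a rest ih =>
    intro st d hP hd
    simp only [List.foldl_cons]
    refine ih _ _ (skAstep_P a hP) ?_
    unfold skBstep
    cases hT : (PySem.Dict.mk a).get? "title" with
    | none => rw [hd]; unfold skAstep; rw [hT]
    | some title =>
      simp only [skL1, he, if_pos, hd]
      exact (skAstep_eq_skF hT hP).symm

lemma skP_fold (e : String) (arts : List SKArt) :
    ∀ (st : Option SKArt × Int), skP st → skP (arts.foldl (skAstep e) st) := by
  induction arts with
  | nil => intro st h; exact h
  | cons a rest ih => intro st h; exact ih _ (skAstep_P a h)

lemma skInit_getD (e : String) :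
    ∀ (es : List String) (d : SKD), d.getD e ((0 : Int), none) = ((0 : Int), none) →
      (es.foldl (fun d e' => d.insert e' ((0 : Int), (none : Option SKArt))) d).getD e ((0 : Int), none) = ((0 : Int), none) := by
  intro es
  induction es with
  | nil => intro d h; exact h
  | cons e' rest ih =>
    intro d h
    refine ih _ ?_
    rw [PySem.Dict.getD_insert]
    split_ifs <;> simp [h]

-- sum of an indicator over a duplicate-free list
lemma skIndSum (x : String) :
    ∀ (L : List String), L.Nodup →
      (L.map (fun w => if x = w then (1 : Int) else 0)).sum = if x ∈ L then 1 else 0 := by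
  intro L
  induction L with
  | nil => intro _; simp
  | cons y rest ih =>
    intro hnd
    rw [List.nodup_cons] at hnd
    simp only [List.map_cons, List.sum_cons, ih hnd.2, List.mem_cons]
    by_cases hx : x = y
    · subst hx
      simp [hnd.1]
    · simp [hx]

-- counting through a covering duplicate-free vocabulary
lemma skSumCount (p : String → Bool) :
    ∀ (ws V : List String), V.Nodup → (∀ w ∈ ws, w ∈ V) →
      ((V.filter p).map (fun w => ((ws.count w : Nat) : Int))).sum = ((ws.countP p : Nat) : Int) := by
  intro ws
  induction ws with
  | nil => intro V _ _; simp
  | cons x ws ih =>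
    intro V hnd hcov
    have hx : x ∈ V := hcov x (by simp)
    have hcov' : ∀ w ∈ ws, w ∈ V := fun w hw => hcov w (by simp [hw])
    have hsplit : ∀ w : String, (((x :: ws).count w : Nat) : Int) =
        ((ws.count w : Nat) : Int) + (if w = x then (1 : Int) else 0) := by
      intro w
      rw [List.count_cons]
      by_cases hwx : w = x
      · simp [hwx]
      · simp [hwx, Ne.symm hwx]
    calc ((V.filter p).map (fun w => (((x :: ws).count w : Nat) : Int))).sum
        = ((V.filter p).map (fun w => ((ws.count w : Nat) : Int) + (if w = x then (1 : Int) else 0))).sum := by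
          exact congrArg List.sum (List.map_congr_left (fun w _ => hsplit w))
      _ = ((V.filter p).map (fun w => ((ws.count w : Nat) : Int))).sum
            + ((V.filter p).map (fun w => if w = x then (1 : Int) else 0)).sum := by
          rw [← List.sum_map_add]
      _ = ((ws.countP p : Nat) : Int) + (if x ∈ V.filter p then 1 else 0) := by
          rw [ih V hnd hcov']
          congr 1
          have : ((V.filter p).map (fun w => if w = x then (1 : Int) else 0)).sum
              = ((V.filter p).map (fun w => if x = w then (1 : Int) else 0)).sum := by
            exact congrArg List.sum (List.map_congr_left (fun w _ => by
              by_cases h : w = x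
              · subst h; simp
              · simp [h, Ne.symm h]))
          rw [this, skIndSum x _ (hnd.filter p)]
      _ = (((x :: ws).countP p : Nat) : Int) := by
          rw [List.countP_cons]
          by_cases hp : p x
          · simp [List.mem_filter, hx, hp]
          · simp [List.mem_filter, hp]

-- the counter loop of Source B is Counter(words), so its lookups are word counts
lemma skCnt_getD (e w : String) : (skCnt e).getD w 0 = (((skWords e).count w : Nat) : Int) := by
  unfold skCnt
  rw [PySem.Dict.foldl_insert_getD_add_one_eq_counter, PySem.Dict.getD_counter]

-- vocabulary membership is monotone along the fold
lemma skVocab_mono (w : String) :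
    ∀ (l : List String) (s : PySem.Set String), w ∈ s →
      w ∈ l.foldl (fun s e => PySem.Set.update s (skCnt e).keys) s := by
  intro l
  induction l with
  | nil => intro s h; exact h
  | cons e rest ih =>
    intro s h
    rw [List.foldl_cons]
    exact ih _ (by rw [PySem.Set.mem_update]; exact Or.inl h)

-- every word of every entity is in the vocabulary
lemma skVocab_cover (w e : String) (hw : w ∈ skWords e) :
    ∀ (l : List String) (s : PySem.Set String), e ∈ l →
      w ∈ l.foldl (fun s e => PySem.Set.update s (skCnt e).keys) s := by
  intro l
  induction l with
  | nil => intro s h; exact absurd h (List.not_mem_nil)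
  | cons e' rest ih =>
    intro s hel
    rcases List.mem_cons.mp hel with he | he
    · subst he
      rw [List.foldl_cons]
      apply skVocab_mono
      rw [PySem.Set.mem_update]
      refine Or.inr ?_
      unfold skCnt
      rw [PySem.Dict.foldl_insert_getD_add_one_eq_counter, PySem.Dict.keys_counter,
        PySem.Set.mem_ofList]
      exact hw
    · rw [List.foldl_cons]
      exact ih _ he

lemma skVocab_nodup :
    ∀ (l : List String) (s : PySem.Set String), s.Nodup →
      (l.foldl (fun s e => PySem.Set.update s (skCnt e).keys) s).Nodup := by
  intro l
  induction l with
  | nil => intro s h; exact h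
  | cons e rest ih =>
    intro s h
    rw [List.foldl_cons]
    exact ih _ (PySem.Set.nodup_update _ _ h)

-- B's score (counter lookups over the matched vocabulary) is A's score
lemma skScoreEq (entities : List String) (e : String) (he : e ∈ entities) (tl : String) :
    (((PySem.List.sorted (skVocab entities) (fun x => x) false).filter
        (fun w => PySem.Str.isIn w tl)).map (fun w => (skCnt e).getD w 0)).sum = skScore e tl := by
  set V := PySem.List.sorted (skVocab entities) (fun x => x) false with hV
  have hnd : V.Nodup :=
    ((PySem.List.sorted_perm (skVocab entities) (fun x => x) false).nodup_iff).mpr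
      (skVocab_nodup entities PySem.Set.empty (by simp [PySem.Set.empty]))
  have hcov : ∀ w ∈ skWords e, w ∈ V := by
    intro w hw
    rw [hV, PySem.List.mem_sorted]
    exact skVocab_cover w e hw entities PySem.Set.empty he
  have := skSumCount (fun w => PySem.Str.isIn w tl) (skWords e) V hnd hcov
  calc ((V.filter (fun w => PySem.Str.isIn w tl)).map (fun w => (skCnt e).getD w 0)).sum
      = ((V.filter (fun w => PySem.Str.isIn w tl)).map
          (fun w => (((skWords e).count w : Nat) : Int))).sum := by
        exact congrArg List.sum (List.map_congr_left (fun w _ => skCnt_getD e w))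
    _ = (((skWords e).countP (fun w => PySem.Str.isIn w tl) : Nat) : Int) := this
    _ = skScore e tl := by rw [skScore, List.countP_eq_length_filter]

-- B's per-article lambda (counters + matched vocabulary) is exactly skBstep
lemma skB_lambda_eq (entities : List String) :
    (fun (d : SKD) (article : SKArt) =>
      match (PySem.Dict.mk article).get? "title" with
      | none => d
      | some title =>
        let tl := PySem.Str.lower title
        let matched := (PySem.List.sorted (skVocab entities) (fun x => x) false).filter
          (fun w => PySem.Str.isIn w tl)
        (entities.map (fun e => (e, skCnt e))).foldl (fun d p =>
          let s : Int := (matched.map (fun w => p.2.getD w 0)).sum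
          if s > (d.getD p.1 ((0 : Int), none)).1 then d.insert p.1 (s, some article) else d) d)
    = skBstep entities := by
  funext d a
  unfold skBstep
  cases hT : (PySem.Dict.mk a).get? "title" with
  | none => rfl
  | some title =>
    simp only [List.foldl_map]
    apply PySem.List.foldl_congr_mem
    intro d' e hmem
    simp only [skBE, skScoreEq entities e hmem (PySem.Str.lower title)]

-- B's prep fold is (entity-counter pairs, vocabulary)
lemma skPrep_eq (entities : List String) :
    entities.foldl
      (fun (p : List (String × PySem.Dict String Int) × PySem.Set String) e =>
        let c := (PySem.Str.split₀ (PySem.Str.lower e)).foldl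
          (fun (d : PySem.Dict String Int) w => d.insert w (d.getD w 0 + 1)) PySem.Dict.empty
        (p.1 ++ [(e, c)], PySem.Set.update p.2 c.keys))
      ([], PySem.Set.empty)
    = (entities.map (fun e => (e, skCnt e)), skVocab entities) := by
  show entities.foldl
      (fun (p : List (String × PySem.Dict String Int) × PySem.Set String) e =>
        (p.1 ++ [(e, skCnt e)], PySem.Set.update p.2 (skCnt e).keys))
      ([], PySem.Set.empty) = _
  rw [PySem.List.foldl_prod_mk
    (f := fun (l : List (String × PySem.Dict String Int)) e => l ++ [(e, skCnt e)])
    (g := fun (s : PySem.Set String) e => PySem.Set.update s (skCnt e).keys)]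
  rw [PySem.List.foldl_append_singleton_eq_map]
  simp [skVocab]

theorem search_knowledge_for_entities_py_spec' (knowledge : List (String × List (List (String × String)))) (entities : List String) :
    search_knowledge_for_entities_py knowledge entities = search_knowledge_for_entities_py_alt knowledge entities := by
  unfold search_knowledge_for_entities_py search_knowledge_for_entities_py_alt
  cases hA : (PySem.Dict.mk knowledge).get? "articles" with
  | none => rfl
  | some arts =>
    simp only [skPrep_eq]
    rw [show (fun (d : SKD) (article : SKArt) =>
      match (PySem.Dict.mk article).get? "title" with
      | none => d
      | some title =>
        (entities.map (fun e => (e, skCnt e))).foldl (fun d p =>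
          if ((((PySem.List.sorted (skVocab entities) (fun x => x) false).filter
                (fun w => PySem.Str.isIn w (PySem.Str.lower title))).map
                (fun w => p.2.getD w 0)).sum) > (d.getD p.1 ((0 : Int), none)).1
          then d.insert p.1 ((((PySem.List.sorted (skVocab entities) (fun x => x) false).filter
                (fun w => PySem.Str.isIn w (PySem.Str.lower title))).map
                (fun w => p.2.getD w 0)).sum, some article) else d) d)
      = skBstep entities from skB_lambda_eq entities]
    congr 1
    apply PySem.List.foldl_congr_mem
    intro acc e he
    have hbest : (List.foldl (skBstep entities)
        (List.foldl (fun d e => d.insert e ((0 : Int), (none : Option SKArt))) PySem.Dict.empty entities)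
          arts).getD e ((0 : Int), none)
        = ((arts.foldl (skAstep e) (none, 0)).2, (arts.foldl (skAstep e) (none, 0)).1) := by
      refine skL2 entities e he arts (none, 0) _ (Or.inl ⟨rfl, rfl⟩) ?_
      exact skInit_getD e entities PySem.Dict.empty (by simp)
    rw [hbest]
    show (match (List.foldl (skAstep e) ((none : Option SKArt), (0 : Int)) arts).1 with
      | none => acc
      | some art =>
        match (PySem.Dict.mk art).get? "content" with
        | none => acc
        | some content => acc.insert e (PySem.Str.slice content none (some 1000))) = _
    rcases skP_fold e arts (none, 0) (Or.inl ⟨rfl, rfl⟩) with ⟨h1, h2⟩ | ⟨a, h1, h2⟩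
    · rw [h1, h2]; simp
    · rw [h1]; simp [h2]

-- ===== VERDICT (by name: the statement is the Claim_ definition above) =====
theorem search_knowledge_for_entities_py_spec : Claim_equal_search_knowledge_for_entities_py := by
  intro knowledge entities _ _
  exact search_knowledge_for_entities_py_spec' knowledge entities
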